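-- pv_equiv track=rewrite | github.com/paiml/depyler | examples/hard_db_vector_clock.py | vc_happens_before
-- ===== SOURCE A (Python) =====
-- from typing import List, Tuple
--
-- def vc_happens_before(a: List[int], b: List[int]) -> bool:
--     at_least_one_less: bool = False
--     for i in range(len(a)):
--         if a[i] > b[i]:
--             return False
--         if a[i] < b[i]:
--             at_least_one_less = True
--     return at_least_one_less
-- ===== SOURCE B (Python) =====
-- def vc_happens_before(a, b):
--     # Lattice formulation: a happens-before b iff the componentwise join of a
--     # with b's prefix equals that prefix (a <= b) while a itself differs from it.
--     merged = [max(a[i], b[i]) for i in range(len(a))]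
--     prefix = b[:len(a)]
--     return merged == prefix and a != prefix
-- ===== Notes on version B (the rewrite author's own statement) =====
-- stated objective: alternative
-- what changed: A's stateful early-exit scan is replaced by the vector-clock lattice test: build the componentwise join merged=[max(a[i],b[i])] and b's prefix, then return merged == prefix and a != prefix (a happens-before b iff a join b = b and a != b).
-- outside the precondition, e.g. on vc_happens_before([5, 0], [1]): A returns False, B raises IndexError
import Mathlib
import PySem

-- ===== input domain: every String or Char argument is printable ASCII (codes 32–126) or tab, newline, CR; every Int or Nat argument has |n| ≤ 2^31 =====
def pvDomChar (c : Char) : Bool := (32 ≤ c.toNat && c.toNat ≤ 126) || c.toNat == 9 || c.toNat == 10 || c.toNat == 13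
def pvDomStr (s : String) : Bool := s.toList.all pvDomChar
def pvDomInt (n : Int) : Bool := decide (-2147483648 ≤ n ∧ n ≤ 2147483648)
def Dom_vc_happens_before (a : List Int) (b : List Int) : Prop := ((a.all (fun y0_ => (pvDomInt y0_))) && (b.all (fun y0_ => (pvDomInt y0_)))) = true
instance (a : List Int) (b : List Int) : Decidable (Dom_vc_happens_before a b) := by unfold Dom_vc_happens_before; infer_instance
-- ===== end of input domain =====

-- B replaces A's stateful early-exit scan with the lattice test: componentwise join equals b's prefix and a differs from it (alternative; equal cost).


-- ===== PORT A =====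
-- the for-loop of A: fuel counts the remaining iterations (fuel + i = len(a) at every call)
def vcGoA (a b : List Int) (fuel : Nat) (i : Nat) (flag : Bool) : Bool :=
  match fuel with
  | 0 => flag
  | f + 1 =>
    match PySem.List.pyGet? a (i : Int), PySem.List.pyGet? b (i : Int) with
    | some x, some y =>
      if x > y then false
      else vcGoA a b f (i + 1) (if x < y then true else flag)
    | _, _ => false   -- IndexError on b[i] (excluded by Pre_); a[i] never fails with this fuel

def vc_happens_before (a : List Int) (b : List Int) : Bool :=
  vcGoA a b a.length 0 false

-- ===== PORT B =====
def vc_happens_before_alt (a : List Int) (b : List Int) : Bool :=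
  let merged := (List.range a.length).map (fun i => max (a.getD i 0) (b.getD i 0))
  let pfx := PySem.List.slice b none (some (a.length : Int))   -- b[:len(a)]
  decide (merged = pfx) && decide (a ≠ pfx)

-- ===== PRECONDITION & SPEC =====
-- Pre_ is the natural vector-clock domain: the two clocks compare componentwise, so b must be at
-- least as long as a; outside it Python A raises IndexError except when its early exit happens to
-- fire first (an accident of the loop order), and Python B raises IndexError.
def Pre_vc_happens_before (a : List Int) (b : List Int) : Prop := a.length ≤ b.length
instance (a : List Int) (b : List Int) : Decidable (Pre_vc_happens_before a b) := by unfold Pre_vc_happens_before; infer_instance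
def pvWitness_vc_happens_before : List Int × List Int := ([1, 2], [2, 2])

def Spec_vc_happens_before (a : List Int) (b : List Int) (out : Bool) : Prop := out = vc_happens_before_alt a b
instance (a : List Int) (b : List Int) (out : Bool) : Decidable (Spec_vc_happens_before a b out) := by unfold Spec_vc_happens_before; infer_instance

-- ===== CLAIM (what is proved, stated in full; the proofs are below) =====
def Claim_equal_vc_happens_before : Prop := ∀ (a : List Int) (b : List Int), Dom_vc_happens_before a b → Pre_vc_happens_before a b → Spec_vc_happens_before a b (vc_happens_before a b)

-- ===== LEMMAS AND PROOFS =====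

-- loop invariant: the A-loop from index i computes "tail dominates && (tail strictly-less || flag)"
lemma vcGoA_eq (a b : List Int) (hab : a.length ≤ b.length) :
    ∀ (fuel i : Nat) (flag : Bool), fuel + i = a.length →
      vcGoA a b fuel i flag =
        (decide (∀ j < a.length, i ≤ j → a.getD j 0 ≤ b.getD j 0) &&
         (decide (∃ j < a.length, i ≤ j ∧ a.getD j 0 < b.getD j 0) || flag)) := by
  intro fuel
  induction fuel with
  | zero =>
    intro i flag h
    have hi : i = a.length := by omega
    subst hi
    have h1 : ∀ j < a.length, a.length ≤ j → a.getD j 0 ≤ b.getD j 0 := by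
      intro j hj hj2; omega
    have h2 : ¬ ∃ j < a.length, a.length ≤ j ∧ a.getD j 0 < b.getD j 0 := by
      rintro ⟨j, hj, hj2, -⟩; omega
    simp only [vcGoA, decide_eq_true h1, decide_eq_false h2, Bool.true_and, Bool.false_or]
  | succ f ih =>
    intro i flag h
    have hia : i < a.length := by omega
    have hib : i < b.length := by omega
    have hga : PySem.List.pyGet? a (i : Int) = some (a.getD i 0) := by
      simp [PySem.List.pyGet?, PySem.List.pyIdx?, hia, List.getD_eq_getElem?_getD]
    have hgb : PySem.List.pyGet? b (i : Int) = some (b.getD i 0) := by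
      simp [PySem.List.pyGet?, PySem.List.pyIdx?, hib, List.getD_eq_getElem?_getD]
    simp only [vcGoA, hga, hgb]
    by_cases hgt : a.getD i 0 > b.getD i 0
    · simp only [if_pos hgt]
      have hno : ¬ ∀ j < a.length, i ≤ j → a.getD j 0 ≤ b.getD j 0 := by
        intro hall; exact absurd (hall i hia le_rfl) (by omega)
      rw [decide_eq_false hno, Bool.false_and]
    · simp only [if_neg hgt]
      rw [ih (i + 1) _ (by omega)]
      have hA : (∀ j < a.length, i + 1 ≤ j → a.getD j 0 ≤ b.getD j 0)
              ↔ (∀ j < a.length, i ≤ j → a.getD j 0 ≤ b.getD j 0) := by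
        constructor
        · intro h' j hj hij
          rcases Nat.eq_or_lt_of_le hij with rfl | hlt
          · omega
          · exact h' j hj (by omega)
        · intro h' j hj hij; exact h' j hj (by omega)
      have hE : (∃ j < a.length, i ≤ j ∧ a.getD j 0 < b.getD j 0)
              ↔ (a.getD i 0 < b.getD i 0) ∨ (∃ j < a.length, i + 1 ≤ j ∧ a.getD j 0 < b.getD j 0) := by
        constructor
        · rintro ⟨j, hj, hij, hlt⟩
          rcases Nat.eq_or_lt_of_le hij with rfl | h'
          · exact Or.inl hlt
          · exact Or.inr ⟨j, hj, by omega, hlt⟩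
        · rintro (hlt | ⟨j, hj, hij, hlt⟩)
          · exact ⟨i, hia, le_rfl, hlt⟩
          · exact ⟨j, hj, by omega, hlt⟩
      have hAd : decide (∀ j < a.length, i + 1 ≤ j → a.getD j 0 ≤ b.getD j 0)
               = decide (∀ j < a.length, i ≤ j → a.getD j 0 ≤ b.getD j 0) := by
        rw [decide_eq_decide]; exact hA
      rw [hAd]
      congr 1
      by_cases hlt : a.getD i 0 < b.getD i 0
      · rw [if_pos hlt]
        have hEi : decide (∃ j < a.length, i ≤ j ∧ a.getD j 0 < b.getD j 0) = true :=
          decide_eq_true (hE.mpr (Or.inl hlt))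
        rw [hEi, Bool.or_true, Bool.true_or]
      · rw [if_neg hlt]
        have hEi : decide (∃ j < a.length, i ≤ j ∧ a.getD j 0 < b.getD j 0)
                 = decide (∃ j < a.length, i + 1 ≤ j ∧ a.getD j 0 < b.getD j 0) := by
          rw [decide_eq_decide, hE]
          exact or_iff_right hlt
        rw [hEi]

-- B's lattice test in terms of the bounded quantifiers
lemma alt_eq (a b : List Int) (hab : a.length ≤ b.length) :
    vc_happens_before_alt a b =
      (decide (∀ j < a.length, 0 ≤ j → a.getD j 0 ≤ b.getD j 0) &&
       (decide (∃ j < a.length, 0 ≤ j ∧ a.getD j 0 < b.getD j 0) || false)) := by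
  unfold vc_happens_before_alt
  rw [PySem.List.slice_to_natCast]
  rw [Bool.eq_iff_iff]
  have hlenm : ((List.range a.length).map (fun i => max (a.getD i 0) (b.getD i 0))).length = a.length := by simp
  have hlent : (b.take a.length).length = a.length := by simp [hab]
  have hmerge : ((List.range a.length).map (fun i => max (a.getD i 0) (b.getD i 0)) = b.take a.length)
      ↔ ∀ j < a.length, a.getD j 0 ≤ b.getD j 0 := by
    constructor
    · intro he j hj
      have := congrArg (fun l => l.getD j 0) he
      simp only at this
      rw [List.getD_eq_getElem _ _ (by omega), List.getD_eq_getElem _ _ (by omega)] at this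
      simp only [List.getElem_map, List.getElem_range, List.getElem_take] at this
      have hja : a.getD j 0 = a[j] := List.getD_eq_getElem _ _ hj
      have hjb : b.getD j 0 = b[j]'(by omega) := List.getD_eq_getElem _ _ (by omega)
      rw [hja, hjb]
      omega
    · intro hle
      apply List.ext_getElem (by omega)
      intro j h1 h2
      simp only [List.getElem_map, List.getElem_range, List.getElem_take]
      have hj : j < a.length := by simpa using h1
      have hja : a.getD j 0 = a[j] := List.getD_eq_getElem _ _ hj
      have hjb : b.getD j 0 = b[j]'(by omega) := List.getD_eq_getElem _ _ (by omega)
      have := hle j hj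
      rw [hja, hjb] at this ⊢
      omega
  have hpref : (a = b.take a.length) ↔ ∀ j < a.length, a.getD j 0 = b.getD j 0 := by
    constructor
    · intro he j hj
      have := congrArg (fun l => List.getD l j 0) he
      simp only at this
      rw [List.getD_eq_getElem _ _ hj] at this
      rw [List.getD_eq_getElem _ _ (by omega : j < (b.take a.length).length)] at this
      simp only [List.getElem_take] at this
      rw [List.getD_eq_getElem _ _ hj, List.getD_eq_getElem _ _ (by omega : j < b.length)]
      exact this
    · intro he
      apply List.ext_getElem (by simp [hab])
      intro j h1 h2
      have := he j h1
      rw [List.getD_eq_getElem _ _ h1, List.getD_eq_getElem _ _ (by omega)] at this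
      simpa [List.getElem_take] using this
  simp only [decide_eq_true_eq, Bool.and_eq_true, Bool.or_false]
  simp only [ne_eq]
  rw [hmerge, hpref]
  constructor
  · rintro ⟨hdom, hne⟩
    refine ⟨fun j hj _ => hdom j hj, ?_⟩
    by_contra hno
    push Not at hno
    exact hne (fun j hj => le_antisymm (hdom j hj) (by have := hno j hj (by omega); omega))
  · rintro ⟨hdom, j, hj, -, hlt⟩
    refine ⟨fun k hk => hdom k hk (by omega), fun heq => ?_⟩
    exact absurd (heq j hj) (by omega)

-- ===== VERDICT (by name: the statement is the Claim_ definition above) =====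
theorem vc_happens_before_spec : Claim_equal_vc_happens_before := by
  intro a b _ hpre
  unfold Spec_vc_happens_before vc_happens_before
  rw [vcGoA_eq a b hpre a.length 0 false (by omega), alt_eq a b hpre]
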